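-- pv_equiv track=rewrite | github.com/AIvaylov02/FMI-Weekly-Schedule-Helper | subject.py | is_valid_person_name
-- ===== SOURCE A (Python) =====
-- def is_valid_subject_name(name):
--     if name is None:
--         return False
--     elif not name[0].isupper():  # A valid subject name starts with capital letter
--         return False
--     else:
--         remainder = name[1:]  # And has only letters, digits or these special symbols
--         for curr_char in remainder:
--             if not (curr_char.isalpha() or curr_char.isdigit() or curr_char in (',', '.', '(', ')', '-', ' ')):
--                 return False
--     return True
--
-- def is_valid_person_name(name):
--     if not is_valid_subject_name(name):
--         return False
--     else:
--         remainder = name[1:]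
--         white_space_found = False
--         second_capital_found = False
--         for curr_char in remainder:  # A valid person name should consist of 2 names with space between
--             if white_space_found:
--                 if curr_char.isupper():
--                     second_capital_found = True
--             elif curr_char == ' ':
--                 white_space_found = True
--             elif not curr_char.islower():  # All other symbols should be lowercase
--                 return False
--         if white_space_found == False or second_capital_found == False:
--             return False
--         else:
--             return True
-- ===== SOURCE B (Python) =====
-- def is_valid_person_name(name):
--     # Split the remainder at the first space and validate the two segments
--     # separately, instead of threading white_space_found/second_capital flags
--     # through one scan with early returns.
--     if name is None:
--         return False
--     if not name[:1].isupper():  # also rejects the empty string (no IndexError)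
--         return False
--     remainder = name[1:]
--     if not all(c.isalpha() or c.isdigit() or c in ',.()- ' for c in remainder):
--         return False
--     space_index = remainder.find(' ')
--     if space_index == -1:
--         return False
--     first = remainder[:space_index]
--     second = remainder[space_index + 1:]
--     return all(c.islower() for c in first) and any(c.isupper() for c in second)
-- ===== Notes on version B (the rewrite author's own statement) =====
-- stated objective: simpler
-- what changed: B splits the remainder at the first space (str.find + two slices) and validates the prefix with all(islower) and the suffix with any(isupper), replacing A's single stateful scan that threads white_space_found/second_capital_found flags with early returns; B also checks the leading capital via name[:1].isupper() so it never indexes.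
-- outside the precondition, e.g. on is_valid_person_name(''): A raises IndexError, B returns False
import Mathlib
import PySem

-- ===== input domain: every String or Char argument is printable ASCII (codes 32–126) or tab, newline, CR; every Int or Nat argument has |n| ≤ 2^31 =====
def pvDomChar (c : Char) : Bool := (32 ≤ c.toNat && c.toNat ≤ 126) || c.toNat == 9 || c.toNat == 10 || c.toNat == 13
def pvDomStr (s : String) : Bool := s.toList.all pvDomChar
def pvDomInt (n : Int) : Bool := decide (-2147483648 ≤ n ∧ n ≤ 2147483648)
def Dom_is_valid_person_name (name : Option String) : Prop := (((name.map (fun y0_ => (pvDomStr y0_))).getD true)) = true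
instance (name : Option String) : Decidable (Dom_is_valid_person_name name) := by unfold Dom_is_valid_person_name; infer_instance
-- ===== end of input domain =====

-- B validates the two name segments separately (find the first space, slice, all/any)
-- instead of A's single stateful flag-threading scan; simpler decomposition, same cost.

-- ===== PORT A =====
def pvAllowedA (c : Char) : Bool :=
  PySem.Chars.isalpha c || PySem.Chars.isdigit c || [',', '.', '(', ')', '-', ' '].contains c

def is_valid_subject_name (name : Option String) : Bool :=
  match name with
  | none => false
  | some s =>
    match PySem.List.pyGet? s.toList 0 with
    | none => false   -- name[0] raises IndexError in Python; excluded by Pre_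
    | some c0 =>
      if !PySem.Chars.isupper c0 then false
      else (PySem.List.slice s.toList (some 1) none).all pvAllowedA

-- the for-loop of A with its two flags; `none` = the early `return False`
def pvLoopA : List Char → Bool → Bool → Option (Bool × Bool)
  | [], ws, sc => some (ws, sc)
  | c :: rest, ws, sc =>
    if ws then pvLoopA rest ws (if PySem.Chars.isupper c then true else sc)
    else if c == ' ' then pvLoopA rest true sc
    else if !PySem.Chars.islower c then none
    else pvLoopA rest ws sc

def is_valid_person_name (name : Option String) : Bool :=
  if !is_valid_subject_name name then false
  else
    match name with
    | none => false   -- unreachable: is_valid_subject_name rejects None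
    | some s =>
      match pvLoopA (PySem.List.slice s.toList (some 1) none) false false with
      | none => false
      | some (ws, sc) => if ws == false || sc == false then false else true

-- ===== PORT B =====
-- str.isupper() for a (here at most 1-char) string, exact on the ASCII domain:
-- some cased character and no lowercase one
def pvStrIsupper (cs : List Char) : Bool :=
  cs.any (fun c => PySem.Chars.isupper c || PySem.Chars.islower c) &&
  cs.all (fun c => !PySem.Chars.islower c)

def pvAllowedB (c : Char) : Bool :=
  PySem.Chars.isalpha c || PySem.Chars.isdigit c || [',', '.', '(', ')', '-', ' '].contains c

def is_valid_person_name_alt (name : Option String) : Bool :=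
  match name with
  | none => false
  | some s =>
    let cs := s.toList
    if !pvStrIsupper (PySem.List.slice cs none (some 1)) then false
    else
      let remainder := PySem.List.slice cs (some 1) none
      if !remainder.all pvAllowedB then false
      else
        let space_index := PySem.Chars.find remainder [' ']
        if space_index == -1 then false
        else
          (PySem.List.slice remainder none (some space_index)).all PySem.Chars.islower &&
          (PySem.List.slice remainder (some (space_index + 1)) none).any PySem.Chars.isupper

-- ===== PRECONDITION & SPEC =====
-- Pre_ excludes only name = some "", on which A raises IndexError (name[0]).
def Pre_is_valid_person_name (name : Option String) : Prop := name ≠ some ""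
instance (name : Option String) : Decidable (Pre_is_valid_person_name name) := by
  unfold Pre_is_valid_person_name; infer_instance
def pvWitness_is_valid_person_name : Option String := some "Ivan Petrov"

def Spec_is_valid_person_name (name : Option String) (out : Bool) : Prop := out = is_valid_person_name_alt name
instance (name : Option String) (out : Bool) : Decidable (Spec_is_valid_person_name name out) := by unfold Spec_is_valid_person_name; infer_instance

-- ===== CLAIM (what is proved, stated in full; the proofs are below) =====
def Claim_equal_is_valid_person_name : Prop := ∀ (name : Option String), Dom_is_valid_person_name name → Pre_is_valid_person_name name → Spec_is_valid_person_name name (is_valid_person_name name)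

-- ===== LEMMAS AND PROOFS =====

theorem singleton_prefix_cons {d c : Char} {l : List Char} :
    [d] <+: c :: l ↔ d = c := by
  constructor
  · intro h; exact (List.cons_prefix_cons.mp h).1
  · rintro rfl; exact List.prefix_iff_eq_take.mpr rfl

theorem find_cons_self (d : Char) (rest : List Char) :
    PySem.Chars.find (d :: rest) [d] = 0 := by
  have hp : [d] <+: d :: rest := List.prefix_iff_eq_take.mpr rfl
  have h0 : 0 ≤ PySem.Chars.find (d :: rest) [d] :=
    (PySem.Chars.find_nonneg_iff _ _).mpr hp.isInfix
  obtain ⟨-, hmin⟩ := PySem.Chars.find_spec h0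
  by_contra hne
  exact hmin 0 (by omega) hp

theorem find_cons_ne (c d : Char) (rest : List Char) (h : c ≠ d) :
    PySem.Chars.find (c :: rest) [d] =
      if PySem.Chars.find rest [d] = -1 then -1 else PySem.Chars.find rest [d] + 1 := by
  by_cases hF : PySem.Chars.find rest [d] = -1
  · simp only [hF, if_pos]
    rw [PySem.Chars.find_eq_neg_one_iff] at hF ⊢
    intro hinf
    rcases List.infix_cons_iff.mp hinf with hp | hi
    · exact h (singleton_prefix_cons.mp hp).symm
    · exact hF hi
  · simp only [hF, ite_false]
    have hF0 : 0 ≤ PySem.Chars.find rest [d] := by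
      have := PySem.Chars.neg_one_le_find rest [d]; omega
    obtain ⟨hpre, hmin⟩ := PySem.Chars.find_spec hF0
    have hinf : [d] <:+: c :: rest :=
      (hpre.isInfix.trans (List.drop_suffix _ _).isInfix).trans
        (List.infix_cons_iff.mpr (Or.inr (List.infix_refl _)))
    have hN0 : 0 ≤ PySem.Chars.find (c :: rest) [d] :=
      (PySem.Chars.find_nonneg_iff _ _).mpr hinf
    obtain ⟨hNpre, hNmin⟩ := PySem.Chars.find_spec hN0
    set N := PySem.Chars.find (c :: rest) [d] with hNdef
    set F := PySem.Chars.find rest [d] with hFdef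
    have hle : N.toNat ≤ F.toNat + 1 := by
      by_contra hgt
      exact hNmin (F.toNat + 1) (by omega) (by simpa using hpre)
    have hne0 : N.toNat ≠ 0 := by
      intro h0
      rw [h0, List.drop_zero] at hNpre
      exact h (singleton_prefix_cons.mp hNpre).symm
    have hge : F.toNat ≤ N.toNat - 1 := by
      by_contra hlt
      have : [d] <+: rest.drop (N.toNat - 1) := by
        have : (c :: rest).drop N.toNat = rest.drop (N.toNat - 1) := by
          obtain ⟨m, hm⟩ : ∃ m, N.toNat = m + 1 := ⟨N.toNat - 1, by omega⟩
          simp [hm]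
        rwa [this] at hNpre
      exact hmin (N.toNat - 1) (by omega) this
    omega

-- after the space was seen, A's loop only ORs `any isupper` into the second flag
theorem pvLoopA_after_space (post : List Char) (sc : Bool) :
    pvLoopA post true sc = some (true, sc || post.any PySem.Chars.isupper) := by
  induction post generalizing sc with
  | nil => simp [pvLoopA]
  | cons c rest ih =>
    simp only [pvLoopA, if_pos, List.any_cons]
    by_cases h : PySem.Chars.isupper c = true
    · simp [h, ih]
    · simp [h, ih]

-- A's flag-threading scan and B's split-at-first-space agree on any remainder list
theorem pv_main (cs : List Char) :
    (match pvLoopA cs false false with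
     | none => false
     | some (ws, sc) => if ws == false || sc == false then false else true)
    =
    (let i := PySem.Chars.find cs [' ']
     if i == -1 then false
     else
       (PySem.List.slice cs none (some i)).all PySem.Chars.islower &&
       (PySem.List.slice cs (some (i + 1)) none).any PySem.Chars.isupper) := by
  induction cs with
  | nil => decide
  | cons c rest ih =>
    by_cases hc : c = ' '
    · subst hc
      rw [show pvLoopA (' ' :: rest) false false = pvLoopA rest true false from by
            simp [pvLoopA]]
      rw [pvLoopA_after_space]
      simp only [find_cons_self]
      rw [show PySem.List.slice (' ' :: rest) none (some 0) = [] from by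
            simpa using PySem.List.slice_to_natCast (' ' :: rest) 0 ]
      rw [show PySem.List.slice (' ' :: rest) (some (0+1)) none = rest from by
            simpa using PySem.List.slice_from_natCast (' ' :: rest) 1 ]
      cases rest.any PySem.Chars.isupper <;> simp
    · rw [find_cons_ne c ' ' rest hc]
      by_cases hl : PySem.Chars.islower c = true
      · rw [show pvLoopA (c :: rest) false false = pvLoopA rest false false from by
              simp [pvLoopA, hc, hl]]
        rw [ih]
        by_cases hF : PySem.Chars.find rest [' '] = -1
        · simp [hF]
        · have hF0 : 0 ≤ PySem.Chars.find rest [' '] := by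
            have := PySem.Chars.neg_one_le_find rest [' ']; omega
          set F := PySem.Chars.find rest [' '] with hFdef
          simp only [hF, ite_false, show (F + 1 == -1) = false from by simp; omega,
            show (F == -1) = false from by simp [hF]]
          rw [PySem.List.slice_to rest hF0, PySem.List.slice_to (c :: rest) (by omega : (0:Int) ≤ F + 1)]
          rw [PySem.List.slice_from rest (by omega : (0:Int) ≤ F + 1),
              PySem.List.slice_from (c :: rest) (by omega : (0:Int) ≤ F + 1 + 1)]
          rw [show (F+1).toNat = F.toNat + 1 from by omega,
              show (F+1+1).toNat = F.toNat + 1 + 1 from by omega]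
          simp [List.take_succ_cons, List.drop_succ_cons, hl]
      · rw [show pvLoopA (c :: rest) false false = none from by
              simp [pvLoopA, hc, hl]]
        by_cases hF : PySem.Chars.find rest [' '] = -1
        · simp [hF]
        · have hF0 : 0 ≤ PySem.Chars.find rest [' '] := by
            have := PySem.Chars.neg_one_le_find rest [' ']; omega
          set F := PySem.Chars.find rest [' '] with hFdef
          simp only [hF, ite_false, show (F + 1 == -1) = false from by simp; omega]
          rw [PySem.List.slice_to (c :: rest) (by omega : (0:Int) ≤ F + 1),
              show (F+1).toNat = F.toNat + 1 from by omega]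
          simp [List.take_succ_cons, hl]

theorem upper_not_lower (c : Char) (h : PySem.Chars.isupper c = true) :
    PySem.Chars.islower c = false := by
  obtain ⟨hA, hZ⟩ : 'A' ≤ c ∧ c ≤ 'Z' := by simpa [PySem.Chars.isupper] using h
  have hna : ¬ ('a' ≤ c) := fun ha => absurd (le_trans ha hZ) (by decide)
  simp [PySem.Chars.islower, hna]

theorem main_thm (name : Option String) (hpre : name ≠ some "") :
    is_valid_person_name name = is_valid_person_name_alt name := by
  cases name with
  | none => rfl
  | some s =>
    have hs : s.toList ≠ [] := by
      intro h
      exact hpre (by rw [String.toList_eq_nil_iff.mp h])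
    obtain ⟨c, t, hct⟩ := List.exists_cons_of_ne_nil hs
    simp only [is_valid_person_name, is_valid_person_name_alt, is_valid_subject_name, hct]
    rw [show PySem.List.pyGet? (c :: t) 0 = some c from by
          simp [PySem.List.pyGet?, PySem.List.pyIdx?]]
    rw [PySem.List.slice_from_one, show (c :: t).tail = t from rfl]
    rw [show PySem.List.slice (c :: t) none (some 1) = [c] from by
          simpa using PySem.List.slice_to_natCast (c :: t) 1]
    by_cases hu : PySem.Chars.isupper c = true
    · rw [show pvStrIsupper [c] = true from by
            simp [pvStrIsupper, hu, upper_not_lower c hu]]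
      by_cases hall : t.all pvAllowedA = true
      · simp only [hu, hall, show pvAllowedB = pvAllowedA from rfl]
        simpa using pv_main t
      · simp [hu, hall, show pvAllowedB = pvAllowedA from rfl]
    · rw [show pvStrIsupper [c] = false from by simp [pvStrIsupper, hu]]
      simp [hu]

-- ===== VERDICT (by name: the statement is the Claim_ definition above) =====
theorem is_valid_person_name_spec : Claim_equal_is_valid_person_name :=
  fun name _ hpre => main_thm name hpre
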